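-- pv_equiv track=rewrite | github.com/xuxin2023/gas_calibrator | src/gas_calibrator/devices/relay.py | _normalize_bulk_updates
-- ===== SOURCE A (Python) =====
-- from typing import Any, Dict, Iterable, List, Optional, Tuple
--
-- def _normalize_bulk_updates(updates: Any) -> List[Tuple[int, bool]]:
--     if isinstance(updates, dict):
--         items = list(updates.items())
--     else:
--         items = list(updates or [])
--
--     normalized: Dict[int, bool] = {}
--     for item in items:
--         if isinstance(item, dict):
--             channel = item.get("channel")
--             state = item.get("open")
--         elif isinstance(item, (tuple, list)) and len(item) >= 2:
--             channel, state = item[0], item[1]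
--         else:
--             raise TypeError("bulk relay update expects (channel, open_) pairs or {'channel', 'open'} items")
--         normalized[int(channel)] = bool(state)
--     return sorted(normalized.items(), key=lambda pair: pair[0])
-- ===== SOURCE B (Python) =====
-- from typing import Any, List, Tuple
--
-- def _normalize_bulk_updates(updates: Any) -> List[Tuple[int, bool]]:
--     if isinstance(updates, dict):
--         items = list(updates.items())
--     else:
--         items = list(updates or [])
--
--     pairs: List[Tuple[int, bool]] = []
--     for item in items:
--         if isinstance(item, dict):
--             channel = item.get("channel")
--             state = item.get("open")
--         elif isinstance(item, (tuple, list)) and len(item) >= 2: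
--             channel, state = item[0], item[1]
--         else:
--             raise TypeError("bulk relay update expects (channel, open_) pairs or {'channel', 'open'} items")
--         pairs.append((int(channel), bool(state)))
--
--     result: List[Tuple[int, bool]] = []
--     seen = set()
--     for ch, st in reversed(pairs):
--         if ch not in seen:
--             seen.add(ch)
--             result.append((ch, st))
--     result.sort(key=lambda p: p[0])
--     return result
-- ===== Notes on version B (the rewrite author's own statement) =====
-- stated objective: alternative
-- what changed: Replaces the dedup dict with a single reverse scan guarded by a seen-set (last-write-wins becomes keep-first-in-reverse), then sorts the already-deduplicated pairs by channel.
import Mathlib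
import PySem

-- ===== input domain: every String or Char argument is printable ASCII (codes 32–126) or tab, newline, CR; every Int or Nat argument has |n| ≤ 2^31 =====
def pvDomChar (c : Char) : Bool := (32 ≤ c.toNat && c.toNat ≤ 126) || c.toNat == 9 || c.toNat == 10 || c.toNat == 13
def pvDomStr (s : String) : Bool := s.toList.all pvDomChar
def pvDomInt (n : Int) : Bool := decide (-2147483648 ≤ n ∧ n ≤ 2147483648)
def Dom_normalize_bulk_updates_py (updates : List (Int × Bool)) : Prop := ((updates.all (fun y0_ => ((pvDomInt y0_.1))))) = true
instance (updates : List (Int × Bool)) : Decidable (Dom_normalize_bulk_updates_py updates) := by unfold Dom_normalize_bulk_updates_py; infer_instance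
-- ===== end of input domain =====

-- B replaces A's dedup dict by a reverse scan with a seen-set followed by a sort; same cost, no hash map (objective: alternative).


-- ===== PORT A =====
-- On a typed List (Int × Bool) input the dict/list dispatch takes the list branch and the
-- per-item parsing (tuple of length ≥ 2; int(channel), bool(state)) is the identity.
def normalize_bulk_updates_py (updates : List (Int × Bool)) : List (Int × Bool) :=
  let normalized : PySem.Dict Int Bool :=
    updates.foldl (fun d p => d.insert p.1 p.2) PySem.Dict.empty
  PySem.List.sorted normalized.items (fun pair => pair.1) false

-- ===== PORT B =====
-- Same identity parsing pass; then the reverse scan with a seen-set, then the sort.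
def nbAltStep (st : PySem.Set Int × List (Int × Bool)) (p : Int × Bool) :
    PySem.Set Int × List (Int × Bool) :=
  if PySem.Set.contains st.1 p.1 then st else (PySem.Set.add st.1 p.1, st.2 ++ [p])

def normalize_bulk_updates_py_alt (updates : List (Int × Bool)) : List (Int × Bool) :=
  let result := (updates.reverse.foldl nbAltStep (PySem.Set.empty, [])).2
  PySem.List.sorted result (fun p => p.1) false

-- ===== PRECONDITION & SPEC =====
def Spec_normalize_bulk_updates_py (updates : List (Int × Bool)) (out : List (Int × Bool)) : Prop := out = normalize_bulk_updates_py_alt updates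
instance (updates : List (Int × Bool)) (out : List (Int × Bool)) : Decidable (Spec_normalize_bulk_updates_py updates out) := by unfold Spec_normalize_bulk_updates_py; infer_instance

-- ===== CLAIM (what is proved, stated in full; the proofs are below) =====
def Claim_equal_normalize_bulk_updates_py : Prop := ∀ (updates : List (Int × Bool)), Dom_normalize_bulk_updates_py updates → Spec_normalize_bulk_updates_py updates (normalize_bulk_updates_py updates)

-- ===== LEMMAS AND PROOFS =====

-- last value written for channel k (false if k never occurs)
def nbLastVal (l : List (Int × Bool)) (k : Int) : Bool :=
  ((l.filter (fun p => p.1 == k)).map (fun p => p.2)).getLastD false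

-- first value for channel k (false if absent)
def nbFirstVal (l : List (Int × Bool)) (k : Int) : Bool :=
  ((l.filter (fun p => p.1 == k)).map (fun p => p.2)).headD false

-- first occurrences of channels not in s, in order
def nbFirstOcc (s : PySem.Set Int) : List (Int × Bool) → List (Int × Bool)
  | [] => []
  | p :: l => if PySem.Set.contains s p.1 then nbFirstOcc s l
              else p :: nbFirstOcc (PySem.Set.add s p.1) l

theorem nbFirstOcc_cons (s : PySem.Set Int) (q : Int × Bool) (l : List (Int × Bool)) :
    nbFirstOcc s (q :: l)
      = if PySem.Set.contains s q.1 then nbFirstOcc s l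
        else q :: nbFirstOcc (PySem.Set.add s q.1) l := rfl

-- the canonical normal form both ports are shown to equal
def nbCanon (updates : List (Int × Bool)) : List (Int × Bool) :=
  (PySem.List.sorted (PySem.Set.ofList (updates.map (fun p => p.1))) (fun k => k) false).map
    (fun k => (k, nbLastVal updates k))

theorem nb_foldl_keep_last (xs : List Bool) (a : Bool) :
    xs.foldl (fun _ b => b) a = xs.getLastD a := by
  induction xs generalizing a with
  | nil => rfl
  | cons x xs ih => rw [List.foldl_cons, ih, List.getLastD_cons]

theorem nb_getD_foldl_insert (l : List (Int × Bool)) (d : PySem.Dict Int Bool) (k : Int) :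
    (l.foldl (fun d p => d.insert p.1 p.2) d).getD k false
      = ((l.filter (fun p => p.1 == k)).map (fun p => p.2)).foldl (fun _ b => b) (d.getD k false) := by
  induction l generalizing d with
  | nil => rfl
  | cons p l ih =>
      simp only [List.foldl_cons, ih, List.filter_cons]
      by_cases h : p.1 = k
      · simp [h]
      · have h2 : ¬ k = p.1 := fun e => h e.symm
        simp [h, h2, PySem.Dict.getD_insert]

theorem nb_getD_eq_lastVal (updates : List (Int × Bool)) (k : Int) :
    (updates.foldl (fun d p => d.insert p.1 p.2) (PySem.Dict.empty : PySem.Dict Int Bool)).getD k false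
      = nbLastVal updates k := by
  rw [nb_getD_foldl_insert, nb_foldl_keep_last]
  simp [nbLastVal, PySem.Dict.getD_empty]

theorem nb_keys_foldl (updates : List (Int × Bool)) :
    (updates.foldl (fun d p => d.insert p.1 p.2) (PySem.Dict.empty : PySem.Dict Int Bool)).keys
      = PySem.Set.ofList (updates.map (fun p => p.1)) := by
  rw [PySem.Dict.keys_foldl_insert_key updates (fun p => p.1) (fun _ p => p.2)]
  simp [PySem.Dict.keys_empty, PySem.Set.update_nil_left]

theorem nb_nodup_keys (updates : List (Int × Bool)) :
    (updates.foldl (fun d p => d.insert p.1 p.2) (PySem.Dict.empty : PySem.Dict Int Bool)).keys.Nodup := by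
  rw [nb_keys_foldl]; exact PySem.Set.nodup_ofList _

theorem nb_canon_pairwise (updates : List (Int × Bool)) :
    (nbCanon updates).Pairwise (fun a b => a.1 < b.1) := by
  unfold nbCanon
  exact List.Pairwise.map _ (fun a b h => h) (PySem.List.sorted_ofList_pairwise_lt _)

theorem nbA_eq_canon (updates : List (Int × Bool)) :
    normalize_bulk_updates_py updates = nbCanon updates := by
  unfold normalize_bulk_updates_py
  apply PySem.List.sorted_eq_of_perm_of_pairwise_lt
  · have hitems := PySem.Dict.items_eq_map_keys
      (updates.foldl (fun d p => d.insert p.1 p.2) (PySem.Dict.empty : PySem.Dict Int Bool))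
      (nb_nodup_keys updates) false
    rw [hitems, nb_keys_foldl]
    unfold nbCanon
    have hfun : (fun k => (k, nbLastVal updates k))
        = fun k => (k, (updates.foldl (fun d p => d.insert p.1 p.2) (PySem.Dict.empty : PySem.Dict Int Bool)).getD k false) := by
      funext k; rw [nb_getD_eq_lastVal]
    rw [hfun]
    exact (PySem.List.sorted_perm _ _ _).map _
  · exact nb_canon_pairwise updates

theorem nb_firstOcc_scan (l : List (Int × Bool)) (s : PySem.Set Int) (r : List (Int × Bool)) :
    l.foldl nbAltStep (s, r) = (PySem.Set.update s (l.map (fun p => p.1)), r ++ nbFirstOcc s l) := by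
  induction l generalizing s r with
  | nil => simp [PySem.Set.update_nil, nbFirstOcc]
  | cons p l ih =>
      rw [List.foldl_cons]
      by_cases hm : p.1 ∈ s
      · have h : PySem.Set.contains s p.1 := (PySem.Set.contains_iff s p.1).mpr hm
        rw [show nbAltStep (s, r) p = (s, r) from by simp [nbAltStep, hm]]
        rw [ih, nbFirstOcc_cons, if_pos h]
        rw [List.map_cons, PySem.Set.update_cons, PySem.Set.add_of_mem hm]
      · have h : ¬ PySem.Set.contains s p.1 := fun c => hm ((PySem.Set.contains_iff s p.1).mp c)
        rw [show nbAltStep (s, r) p = (PySem.Set.add s p.1, r ++ [p]) from by simp [nbAltStep, hm]]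
        rw [ih, nbFirstOcc_cons, if_neg h]
        rw [List.map_cons, PySem.Set.update_cons]
        simp

theorem nb_firstOcc_key_not_mem (l : List (Int × Bool)) (s : PySem.Set Int)
    (p : Int × Bool) (hp : p ∈ nbFirstOcc s l) : p.1 ∉ s := by
  induction l generalizing s with
  | nil => simp [nbFirstOcc] at hp
  | cons q l ih =>
      rw [nbFirstOcc_cons] at hp
      by_cases h : PySem.Set.contains s q.1
      · rw [if_pos h] at hp; exact ih s hp
      · have hm : q.1 ∉ s := fun m => h ((PySem.Set.contains_iff s q.1).mpr m)
        rw [if_neg h] at hp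
        rcases List.mem_cons.mp hp with heq | hp
        · rw [heq]; exact hm
        · intro hmem
          exact ih (PySem.Set.add s q.1) hp
            (by rw [PySem.Set.mem_add]; exact Or.inl hmem)

theorem nb_firstOcc_mem_keys (l : List (Int × Bool)) (s : PySem.Set Int) (k : Int) :
    k ∈ (nbFirstOcc s l).map (fun p => p.1) ↔ k ∈ l.map (fun p => p.1) ∧ k ∉ s := by
  induction l generalizing s with
  | nil => simp [nbFirstOcc]
  | cons q l ih =>
      rw [nbFirstOcc_cons]
      by_cases h : PySem.Set.contains s q.1
      · have hm : q.1 ∈ s := (PySem.Set.contains_iff s q.1).mp h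
        rw [if_pos h]
        simp only [List.map_cons, List.mem_cons, ih]
        constructor
        · rintro ⟨hk, hks⟩; exact ⟨Or.inr hk, hks⟩
        · rintro ⟨hk | hk, hks⟩
          · exact absurd (hk ▸ hm) hks
          · exact ⟨hk, hks⟩
      · have hm : q.1 ∉ s := fun m => h ((PySem.Set.contains_iff s q.1).mpr m)
        rw [if_neg h]
        simp only [List.map_cons, List.mem_cons, ih, PySem.Set.mem_add]
        constructor
        · rintro (rfl | ⟨hk, hks⟩)
          · exact ⟨Or.inl rfl, hm⟩
          · exact ⟨Or.inr hk, fun m => hks (Or.inl m)⟩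
        · rintro ⟨hk | hk, hks⟩
          · exact Or.inl hk
          · by_cases hkq : k = q.1
            · exact Or.inl hkq
            · exact Or.inr ⟨hk, fun m => (m.elim (fun m1 => hks m1) (fun m2 => hkq m2))⟩

theorem nb_firstOcc_nodup_keys (l : List (Int × Bool)) (s : PySem.Set Int) :
    ((nbFirstOcc s l).map (fun p => p.1)).Nodup := by
  induction l generalizing s with
  | nil => simp [nbFirstOcc]
  | cons q l ih =>
      rw [nbFirstOcc_cons]
      by_cases h : PySem.Set.contains s q.1
      · rw [if_pos h]; exact ih s
      · rw [if_neg h]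
        simp only [List.map_cons, List.nodup_cons]
        refine ⟨fun hmem => ?_, ih (PySem.Set.add s q.1)⟩
        rcases List.mem_map.mp hmem with ⟨p, hp, hpk⟩
        exact nb_firstOcc_key_not_mem l (PySem.Set.add s q.1) p hp
          (by rw [PySem.Set.mem_add]; exact Or.inr hpk)

theorem nb_firstOcc_val (l : List (Int × Bool)) (s : PySem.Set Int)
    (p : Int × Bool) (hp : p ∈ nbFirstOcc s l) : p.2 = nbFirstVal l p.1 := by
  induction l generalizing s with
  | nil => simp [nbFirstOcc] at hp
  | cons q l ih =>
      rw [nbFirstOcc_cons] at hp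
      by_cases h : PySem.Set.contains s q.1
      · have hm : q.1 ∈ s := (PySem.Set.contains_iff s q.1).mp h
        rw [if_pos h] at hp
        have hne : ¬ q.1 = p.1 := fun e => nb_firstOcc_key_not_mem l s p hp (e ▸ hm)
        rw [ih s hp]
        simp [nbFirstVal, hne]
      · rw [if_neg h] at hp
        rcases List.mem_cons.mp hp with heq | hp
        · rw [heq]; simp [nbFirstVal]
        · have hne : ¬ q.1 = p.1 := by
            intro e
            exact nb_firstOcc_key_not_mem l (PySem.Set.add s q.1) p hp
              (by rw [PySem.Set.mem_add]; exact Or.inr e.symm)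
          rw [ih (PySem.Set.add s q.1) hp]
          simp [nbFirstVal, hne]

theorem nb_firstVal_reverse (l : List (Int × Bool)) (k : Int) :
    nbFirstVal l.reverse k = nbLastVal l k := by
  simp only [nbFirstVal, nbLastVal, List.filter_reverse, List.map_reverse]
  rw [List.headD_eq_head?, List.head?_reverse, List.getLastD_eq_getLast?]

theorem nb_self_eq_keys_map {g : Int → Int × Bool} (xs : List (Int × Bool))
    (hval : ∀ p ∈ xs, p = g p.1) :
    xs = (xs.map (fun p => p.1)).map g := by
  rw [List.map_map]
  conv_lhs => rw [show xs = xs.map id from (List.map_id xs).symm]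
  exact List.map_congr_left (fun p hp => hval p hp)

theorem nbB_eq_canon (updates : List (Int × Bool)) :
    normalize_bulk_updates_py_alt updates = nbCanon updates := by
  unfold normalize_bulk_updates_py_alt
  rw [show (updates.reverse.foldl nbAltStep (PySem.Set.empty, [])).2 = nbFirstOcc [] updates.reverse by
    rw [nb_firstOcc_scan]; rfl]
  apply PySem.List.sorted_eq_of_perm_of_pairwise_lt
  · set res := nbFirstOcc ([] : PySem.Set Int) updates.reverse with hres
    have hval : ∀ p ∈ res, p = ((fun k => (k, nbLastVal updates k)) p.1) := by
      intro p hp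
      have hv := nb_firstOcc_val updates.reverse [] p hp
      rw [nb_firstVal_reverse] at hv
      exact Prod.ext rfl hv
    have hself : res = (res.map (fun p => p.1)).map (fun k => (k, nbLastVal updates k)) :=
      nb_self_eq_keys_map res hval
    rw [hself]
    unfold nbCanon
    apply List.Perm.map
    have h1 : (PySem.List.sorted (PySem.Set.ofList (updates.map (fun p => p.1))) (fun k => k) false).Perm
        (PySem.Set.ofList (updates.map (fun p => p.1))) := PySem.List.sorted_perm _ _ _
    have h2 : (PySem.Set.ofList (updates.map (fun p => p.1))).Perm (res.map (fun p => p.1)) := by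
      apply (List.perm_ext_iff_of_nodup (PySem.Set.nodup_ofList _) (by rw [hres]; exact nb_firstOcc_nodup_keys _ _)).mpr
      intro k
      rw [PySem.Set.mem_ofList, hres, nb_firstOcc_mem_keys]
      simp [List.mem_reverse]
    exact h1.trans h2
  · exact nb_canon_pairwise updates

-- ===== VERDICT (by name: the statement is the Claim_ definition above) =====
theorem normalize_bulk_updates_py_spec : Claim_equal_normalize_bulk_updates_py := by
  intro updates _
  unfold Spec_normalize_bulk_updates_py
  rw [nbA_eq_canon, nbB_eq_canon]
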